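-- pv_equiv track=rewrite | github.com/ashnet16/project_euler_solutions | project_euler.py | find_div_of_number
-- ===== SOURCE A (Python) =====
-- def prime_generator(n):  # Sieve of Eratosthenes
--     prime, composite = [], set()
--     for num in range(2, n + 1):
--         if num not in composite:
--             prime.append(num)
--             composite.update(range(num * num, n + 1, num))
--     return prime
--
-- def find_div_of_number(num: int):
--     divisors = set()
--     divisors.add(1)
--     divisors.add(num)
--     for prime_num in prime_generator(num):
--         if num % prime_num == 0:
--             divisors.add(prime_num)
--             divisors.add(num // prime_num)
--     return divisors
-- ===== SOURCE B (Python) =====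
-- def find_div_of_number(num: int):
--     # Trial-division factorization up to sqrt: O(sqrt(n)) instead of a full sieve.
--     divisors = set()
--     divisors.add(1)
--     divisors.add(num)
--     n = num
--     d = 2
--     while d * d <= n:
--         if n % d == 0:
--             divisors.add(d)
--             divisors.add(num // d)
--             while n % d == 0:
--                 n //= d
--         d += 1
--     if n > 1:
--         divisors.add(n)
--         divisors.add(num // n)
--     return divisors
-- ===== Notes on version B (the rewrite author's own statement) =====
-- stated objective: faster
-- what changed: Replaced the full Sieve-of-Eratosthenes primality scan over all of 2..num with trial-division factorization up to sqrt(num): B removes each prime factor as it is found and adds only the factors and their cofactors.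
import Mathlib
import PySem

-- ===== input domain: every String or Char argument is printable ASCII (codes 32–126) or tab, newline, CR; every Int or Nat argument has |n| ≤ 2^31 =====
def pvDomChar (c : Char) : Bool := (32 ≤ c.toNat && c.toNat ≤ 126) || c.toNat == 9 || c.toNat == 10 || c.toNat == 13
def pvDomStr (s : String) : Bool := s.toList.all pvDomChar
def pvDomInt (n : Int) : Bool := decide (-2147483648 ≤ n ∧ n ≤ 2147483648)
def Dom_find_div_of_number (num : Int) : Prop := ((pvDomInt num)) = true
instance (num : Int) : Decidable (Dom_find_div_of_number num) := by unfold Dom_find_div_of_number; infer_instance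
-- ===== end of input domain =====

-- B replaces A's full Sieve-of-Eratosthenes scan of 2..num with trial-division
-- factorization up to √num (asymptotically faster); the returned set is the same.

-- ===== PORT A =====
def pvSieveStep (n : Int) (st : List Int × PySem.Set Int) (m : Int) : List Int × PySem.Set Int :=
  if PySem.Set.contains st.2 m then st
  else (st.1 ++ [m], PySem.Set.update st.2 (PySem.List.pyRange (m * m) (n + 1) m))

def prime_generator (n : Int) : List Int :=
  ((PySem.List.pyRange 2 (n + 1) 1).foldl (pvSieveStep n) ([], PySem.Set.empty)).1

def find_div_of_number (num : Int) : List Int :=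
  (prime_generator num).foldl
    (fun divisors p =>
      if PySem.Int.mod num p == 0 then
        PySem.Set.add (PySem.Set.add divisors p) (PySem.Int.floordiv num p)
      else divisors)
    (PySem.Set.add (PySem.Set.add PySem.Set.empty 1) num)

-- ===== PORT B =====
-- inner 'while n % d == 0: n //= d'; the fuel and the 2 ≤ d / 0 < n guards only make the
-- recursion total (fuel n.toNat always suffices, since n shrinks by a factor ≥ 2 each step)
def pvStripFac (fuel : Nat) (n d : Int) : Int :=
  match fuel with
  | 0 => n
  | fuel + 1 =>
    if 2 ≤ d ∧ 0 < n ∧ PySem.Int.mod n d = 0 then pvStripFac fuel (PySem.Int.floordiv n d) d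
    else n

-- outer 'while d * d <= n' loop of B (fuel only totalizes; it is never exhausted when
-- called with fuel > num - 1, since d strictly increases and the loop stops once d * d > n)
def pvTrialLoop (fuel : Nat) (num n d : Int) (divisors : PySem.Set Int) : Int × PySem.Set Int :=
  match fuel with
  | 0 => (n, divisors)
  | fuel + 1 =>
    if d * d ≤ n then
      if PySem.Int.mod n d == 0 then
        pvTrialLoop fuel num (pvStripFac n.toNat n d) (d + 1)
          (PySem.Set.add (PySem.Set.add divisors d) (PySem.Int.floordiv num d))
      else pvTrialLoop fuel num n (d + 1) divisors
    else (n, divisors)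

def find_div_of_number_alt (num : Int) : List Int :=
  let divisors := PySem.Set.add (PySem.Set.add PySem.Set.empty 1) num
  let r := pvTrialLoop ((num + 1).toNat + 1) num num 2 divisors
  if 1 < r.1 then PySem.Set.add (PySem.Set.add r.2 r.1) (PySem.Int.floordiv num r.1) else r.2

-- ===== PRECONDITION & SPEC =====
def Spec_find_div_of_number (num : Int) (out : List Int) : Prop := out = find_div_of_number_alt num
instance (num : Int) (out : List Int) : Decidable (Spec_find_div_of_number num out) := by unfold Spec_find_div_of_number; infer_instance

-- ===== CLAIM (what is proved, stated in full; the proofs are below) =====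
def Claim_equal_find_div_of_number : Prop := ∀ (num : Int), Dom_find_div_of_number num → Spec_find_div_of_number num (find_div_of_number num)

-- ===== LEMMAS AND PROOFS =====

-- "p is a prime" on Int, as a Bool
def pvPrimeB (p : Int) : Bool := decide (2 ≤ p) && decide (Nat.Prime p.toNat)

-- the filter predicate both sides reduce to: prime and divides num
def pvP (num p : Int) : Bool := pvPrimeB p && decide (p ∣ num)

-- both programs add the pair (p, num // p) for each relevant p
def pvAddPair (num : Int) (ds : PySem.Set Int) (p : Int) : PySem.Set Int :=
  PySem.Set.add (PySem.Set.add ds p) (PySem.Int.floordiv num p)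

def pvDs0 (num : Int) : PySem.Set Int :=
  PySem.Set.add (PySem.Set.add PySem.Set.empty 1) num

theorem pvPrimeB_two_le {p : Int} (h : pvPrimeB p = true) : 2 ≤ p := by
  simp [pvPrimeB] at h; exact h.1

theorem pvPrimeB_prime {p : Int} (h : pvPrimeB p = true) : Nat.Prime p.toNat := by
  simp [pvPrimeB] at h; exact h.2

-- sieve state after processing 2,3,…,1+t
def pvSieveAux (n : Int) (t : Nat) : List Int × PySem.Set Int :=
  ((List.map (fun j : Nat => (2 : Int) + (j : Int)) (List.range t)).foldl (pvSieveStep n) ([], PySem.Set.empty))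

theorem pvSieve_inv (n : Int) (t : Nat) (ht : (t : Int) ≤ n - 1) :
    (pvSieveAux n t).1 = (List.map (fun j : Nat => (2 : Int) + (j : Int)) (List.range t)).filter pvPrimeB
    ∧ ∀ m : Int, m ∈ (pvSieveAux n t).2 ↔
        ∃ p j : Int, pvPrimeB p = true ∧ p ≤ 1 + t ∧ p ≤ j ∧ m = p * j ∧ m ≤ n := by
  induction t with
  | zero =>
    refine ⟨rfl, ?_⟩
    intro m
    constructor
    · intro h; simp [pvSieveAux, PySem.Set.empty] at h
    · rintro ⟨p, j, hp, hple, -, -, -⟩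
      have := pvPrimeB_two_le hp
      omega
  | succ t ihfull =>
    have ht' : (t : Int) ≤ n - 1 := by push_cast at ht ⊢; omega
    obtain ⟨ih1, ih2⟩ := ihfull ht'
    have hm0n : (2 + (t : Int)) ≤ n := by push_cast at ht; omega
    have hstep : pvSieveAux n (t + 1) = pvSieveStep n (pvSieveAux n t) (2 + (t : Int)) := by
      simp [pvSieveAux, List.range_succ]
    have compIff : ((2 + (t : Int)) ∈ (pvSieveAux n t).2) ↔ pvPrimeB (2 + (t : Int)) = false := by
      constructor
      · intro hmem
        obtain ⟨p, j, hp, hple, hpj, hm, -⟩ := ih2 (2 + (t : Int)) |>.mp hmem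
        have hp2 := pvPrimeB_two_le hp
        have hmn : (2 + (t : Int)).toNat = p.natAbs * j.natAbs := by
          have := Int.natAbs_mul p j
          rw [← hm] at this
          omega
        have hnp : ¬ Nat.Prime (2 + (t : Int)).toNat := by
          rw [hmn]
          exact Nat.not_prime_mul (by omega) (by omega)
        simp [pvPrimeB, hnp]
      · intro hfalse
        obtain ⟨M, hMdef⟩ : ∃ M, M = (2 + (t : Int)).toNat := ⟨_, rfl⟩
        have h2m : (2 : Int) ≤ 2 + (t : Int) := by omega
        have hnp : ¬ Nat.Prime M := by
          intro hpr
          rw [hMdef] at hpr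
          simp [pvPrimeB, h2m, hpr] at hfalse
        have hM2 : 2 ≤ M := by omega
        have hpf : Nat.Prime M.minFac := Nat.minFac_prime (by omega)
        have hpd : M.minFac ∣ M := Nat.minFac_dvd _
        have hp2 : 2 ≤ M.minFac := hpf.two_le
        have hpsq : M.minFac ^ 2 ≤ M := Nat.minFac_sq_le_self (by omega) hnp
        have hMj : M.minFac * (M / M.minFac) = M := Nat.mul_div_cancel' hpd
        have hplej : M.minFac ≤ M / M.minFac := by
          have h1 : M.minFac * M.minFac ≤ M.minFac * (M / M.minFac) := by
            rw [hMj]; rw [pow_two] at hpsq; exact hpsq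
          exact Nat.le_of_mul_le_mul_left h1 (by omega)
        obtain ⟨j, hjdef⟩ : ∃ j, j = M / M.minFac := ⟨_, rfl⟩
        rw [← hjdef] at hMj hplej
        have hj2 : 2 ≤ j := by
          rcases (by omega : j = 0 ∨ j = 1 ∨ 2 ≤ j) with h | h | h
          · rw [h, Nat.mul_zero] at hMj; omega
          · rw [h, Nat.mul_one] at hMj; exact absurd (hMj ▸ hpf) hnp
          · exact h
        have h2p : M.minFac * 2 ≤ M := by
          calc M.minFac * 2 ≤ M.minFac * j := Nat.mul_le_mul (Nat.le_refl _) hj2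
            _ = M := hMj
        rw [ih2]
        refine ⟨(M.minFac : Int), (j : Int), ?_, by omega, by exact_mod_cast hplej, ?_, hm0n⟩
        · simp only [pvPrimeB, Bool.and_eq_true, decide_eq_true_eq, Int.toNat_natCast]
          exact ⟨by exact_mod_cast hp2, hpf⟩
        · have hcast : ((M : Nat) : Int) = 2 + (t : Int) := by omega
          rw [← hMj] at hcast
          push_cast at hcast
          exact hcast.symm
    by_cases hmem : (2 + (t : Int)) ∈ (pvSieveAux n t).2
    · have hfalse : pvPrimeB (2 + (t : Int)) = false := compIff.mp hmem
      have hcontains : PySem.Set.contains (pvSieveAux n t).2 (2 + (t : Int)) = true :=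
        (PySem.Set.contains_iff _ _).mpr hmem
      rw [hstep, pvSieveStep, if_pos hcontains]
      constructor
      · rw [ih1]
        simp [List.range_succ, List.filter_append, hfalse]
      · intro m
        rw [ih2 m]
        constructor
        · rintro ⟨p, j, hp, hple, hpj, hm, hmn⟩
          exact ⟨p, j, hp, by push_cast at hple ⊢; omega, hpj, hm, hmn⟩
        · rintro ⟨p, j, hp, hple, hpj, hm, hmn⟩
          refine ⟨p, j, hp, ?_, hpj, hm, hmn⟩
          push_cast at hple ⊢
          rcases lt_or_eq_of_le hple with h | h
          · omega
          · exfalso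
            have : p = 2 + (t : Int) := by omega
            rw [this, hfalse] at hp
            exact Bool.false_ne_true hp
    · have hptrue : pvPrimeB (2 + (t : Int)) = true := by
        cases h : pvPrimeB (2 + (t : Int)) with
        | true => rfl
        | false => exact absurd (compIff.mpr h) hmem
      have hcontains : ¬ PySem.Set.contains (pvSieveAux n t).2 (2 + (t : Int)) = true := by
        rw [PySem.Set.contains_iff]; exact hmem
      rw [hstep, pvSieveStep, if_neg hcontains]
      constructor
      · show (pvSieveAux n t).1 ++ [2 + (t : Int)] = _
        rw [ih1]
        simp [List.range_succ, List.filter_append, hptrue]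
      · intro m
        show m ∈ PySem.Set.update (pvSieveAux n t).2 _ ↔ _
        rw [PySem.Set.mem_update]
        rw [ih2 m]
        rw [PySem.List.mem_pyRange_iff_of_pos (by omega : (0:Int) < 2 + (t : Int))]
        constructor
        · rintro (⟨p, j, hp, hple, hpj, hm, hmn⟩ | ⟨h1, h2, k, hk⟩)
          · exact ⟨p, j, hp, by push_cast at hple ⊢; omega, hpj, hm, hmn⟩
          · have hk0 : 0 ≤ k := by nlinarith [hk, h1, (by omega : (0:Int) < 2 + (t:Int))]
            refine ⟨2 + (t : Int), 2 + (t : Int) + k, hptrue, by push_cast; omega, by omega, by linear_combination hk, by omega⟩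
        · rintro ⟨p, j, hp, hple, hpj, hm, hmn⟩
          by_cases hp1 : p ≤ 1 + (t : Int)
          · exact Or.inl ⟨p, j, hp, hp1, hpj, hm, hmn⟩
          · have hpm0 : p = 2 + (t : Int) := by push_cast at hple; omega
            right
            have hp2 := pvPrimeB_two_le hp
            refine ⟨?_, by omega, j - p, ?_⟩
            · rw [hm, ← hpm0]
              exact mul_le_mul_of_nonneg_left hpj (by omega)
            · rw [hm, ← hpm0]; ring

theorem pvSieve_eq (n : Int) :
    prime_generator n = (PySem.List.pyRange 2 (n + 1) 1).filter pvPrimeB := by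
  unfold prime_generator
  rw [PySem.List.pyRange_one 2 (n + 1)]
  have e : (n + 1 - 2 : Int) = n - 1 := by ring
  rw [e]
  rcases le_or_gt 1 n with hn | hn
  · have ht : (((n - 1).toNat : Nat) : Int) ≤ n - 1 := by omega
    exact (pvSieve_inv n (n - 1).toNat ht).1
  · have e0 : ((n - 1 : Int)).toNat = 0 := by omega
    rw [e0]
    rfl

-- A's function, reduced to a fold over the primes dividing num
theorem pvA_eq (num : Int) :
    find_div_of_number num
      = ((PySem.List.pyRange 2 (num + 1) 1).filter (pvP num)).foldl (pvAddPair num) (pvDs0 num) := by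
  unfold find_div_of_number
  rw [pvSieve_eq]
  rw [PySem.List.foldl_if_eq_foldl_filter (fun x => PySem.Int.mod num x == 0)
      (fun divisors p => PySem.Set.add (PySem.Set.add divisors p) (PySem.Int.floordiv num p))]
  rw [List.filter_filter]
  have hpred : ∀ a ∈ PySem.List.pyRange 2 (num + 1) 1,
      ((PySem.Int.mod num a == 0) && pvPrimeB a) = pvP num a := by
    intro a _
    by_cases h : a ∣ num
    · simp [pvP, h, (PySem.Int.mod_eq_zero_iff_dvd num a).mpr h]
    · have hne : PySem.Int.mod num a ≠ 0 := fun hc => h ((PySem.Int.mod_eq_zero_iff_dvd num a).mp hc)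
      simp [pvP, h, hne]
  rw [List.filter_congr hpred]
  rfl

-- properties of the inner factor-stripping loop
theorem pvStripFac_le (fuel : Nat) : ∀ n d : Int, pvStripFac fuel n d ≤ n := by
  induction fuel with
  | zero => intro n d; simp [pvStripFac]
  | succ fuel ih =>
    intro n d
    rw [pvStripFac]
    split_ifs with h
    · have hd : (0:Int) < d := by omega
      have h1 : PySem.Int.floordiv n d ≤ n := by
        rw [PySem.Int.floordiv_eq_ediv_of_pos hd]
        have := Int.ediv_lt_of_lt_mul hd (by nlinarith [h.2.1, h.1] : n < n * d)
        omega
      exact le_trans (ih _ _) h1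
    · exact le_refl n

theorem pvStripFac_spec (d : Int) (hd : 2 ≤ d) (hdp : Nat.Prime d.toNat) :
    ∀ fuel : Nat, ∀ n : Int, n.toNat ≤ fuel → 0 < n →
    pvStripFac fuel n d ∣ n ∧ 0 < pvStripFac fuel n d ∧ ¬ (d ∣ pvStripFac fuel n d) ∧
      (∀ p : Int, 2 ≤ p → Nat.Prime p.toNat → p ≠ d → (p ∣ pvStripFac fuel n d ↔ p ∣ n)) := by
  intro N
  induction N with
  | zero => intro n hN hn; omega
  | succ N ih =>
    intro n hN hn
    rw [pvStripFac]
    by_cases hc : 2 ≤ d ∧ 0 < n ∧ PySem.Int.mod n d = 0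
    · rw [if_pos hc]
      have hdvd : d ∣ n := (PySem.Int.mod_eq_zero_iff_dvd n d).mp hc.2.2
      rw [PySem.Int.floordiv_eq_ediv_of_pos (by omega : (0:Int) < d)]
      have hmul : n / d * d = n := Int.ediv_mul_cancel hdvd
      have hmpos : 0 < n / d := by
        rcases le_or_gt (n / d) 0 with h | h
        · nlinarith
        · exact h
      have hmlt : n / d < n := Int.ediv_lt_of_lt_mul (by omega) (by nlinarith)
      have hmn : n / d ∣ n := ⟨d, hmul.symm⟩
      obtain ⟨i1, i2, i3, i4⟩ := ih (n / d) (by omega) hmpos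
      refine ⟨i1.trans hmn, i2, i3, ?_⟩
      intro p hp2 hpp hpd
      rw [i4 p hp2 hpp hpd]
      constructor
      · exact fun h => h.trans hmn
      · intro hpn
        have hpprime : Prime p := by
          rw [Int.prime_iff_natAbs_prime]
          have : p.natAbs = p.toNat := by omega
          rw [this]; exact hpp
        have : p ∣ (n / d) * d := by rw [hmul]; exact hpn
        rcases hpprime.dvd_mul.mp this with h | h
        · exact h
        · exfalso
          have : p.natAbs ∣ d.natAbs := Int.natAbs_dvd_natAbs.mpr h
          have hpn' : p.natAbs = p.toNat := by omega
          have hdn' : d.natAbs = d.toNat := by omega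
          rw [hpn', hdn'] at this
          have := (Nat.prime_dvd_prime_iff_eq hpp hdp).mp this
          omega
    · rw [if_neg hc]
      have hnd : ¬ d ∣ n := by
        intro h
        exact hc ⟨hd, hn, (PySem.Int.mod_eq_zero_iff_dvd n d).mpr h⟩
      exact ⟨dvd_rfl, hn, hnd, fun _ _ _ _ => Iff.rfl⟩

-- n > 1 with no divisor in [2, d) and n < d*d is prime
theorem pvNoSmallDiv_prime (n d : Int) (hd : 2 ≤ d) (hn : 1 < n) (hsq : n < d * d)
    (hnos : ∀ e : Int, 2 ≤ e → e < d → ¬ e ∣ n) : Nat.Prime n.toNat := by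
  by_contra hnp
  have hN2 : 2 ≤ n.toNat := by omega
  have hpf := Nat.minFac_prime (n := n.toNat) (by omega)
  have hpd : n.toNat.minFac ∣ n.toNat := Nat.minFac_dvd _
  have hp2 : 2 ≤ n.toNat.minFac := hpf.two_le
  have hpsq : n.toNat.minFac ^ 2 ≤ n.toNat := Nat.minFac_sq_le_self (by omega) hnp
  have hcast : ((n.toNat : Int)) = n := by omega
  have hpdInt : ((n.toNat.minFac : Int)) ∣ n := by
    rw [← hcast]; exact_mod_cast hpd
  have hlt : ((n.toNat.minFac : Int)) < d := by
    by_contra hge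
    push_neg at hge
    have h1 : ((n.toNat.minFac : Int)) * ((n.toNat.minFac : Int)) ≤ n := by
      have := hpsq
      rw [pow_two] at this
      calc ((n.toNat.minFac : Int)) * ((n.toNat.minFac : Int))
          = ((n.toNat.minFac * n.toNat.minFac : Nat) : Int) := by push_cast; ring
        _ ≤ ((n.toNat : Nat) : Int) := by exact_mod_cast this
        _ = n := hcast
    nlinarith [mul_le_mul hge hge (by omega : (0:Int) <= d) (by omega : (0:Int) <= ((n.toNat.minFac : Int)))]
  exact hnos _ (by exact_mod_cast hp2) hlt hpdInt

-- a divisor d of n with no divisor of n in [2, d) is prime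
theorem pvPrime_of_no_small (n d : Int) (hd : 2 ≤ d) (hn : 0 < n) (hdvd : d ∣ n)
    (hnos : ∀ e : Int, 2 ≤ e → e < d → ¬ e ∣ n) : Nat.Prime d.toNat := by
  rw [Nat.prime_def_lt]
  refine ⟨by omega, ?_⟩
  intro m hm hmd
  by_contra hm1
  have hm0 : m ≠ 0 := by rintro rfl; simp at hmd; omega
  have hm2 : 2 ≤ m := by omega
  have hmInt : ((m : Int)) ∣ d := by
    have hcast : ((d.toNat : Int)) = d := by omega
    rw [← hcast]; exact_mod_cast hmd
  exact hnos m (by exact_mod_cast hm2) (by omega) (hmInt.trans hdvd)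

-- a prime divisor (≥ 2) of a prime n equals n
theorem pvPrimeDvdPrime (n p : Int) (hn : 1 < n) (hnp : Nat.Prime n.toNat)
    (hp : 2 ≤ p) (hpd : p ∣ n) : p = n := by
  have h1 : p.toNat ∣ n.toNat := by
    have h2 : p.natAbs ∣ n.natAbs := Int.natAbs_dvd_natAbs.mpr hpd
    have e1 : p.natAbs = p.toNat := by omega
    have e2 : n.natAbs = n.toNat := by omega
    rw [e1, e2] at h2; exact h2
  rcases (Nat.Prime.eq_one_or_self_of_dvd hnp _ h1) with h | h <;> omega

-- exit of the outer loop: when n < d*d, the primes ≥ d dividing num are [n] (n > 1) or [] (n = 1)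
theorem pvTrial_exit (num n d : Int) (hnum : 2 ≤ num) (ds : PySem.Set Int)
    (hd : 2 ≤ d) (hn : 0 < n) (hdvd : n ∣ num) (hsq : n < d * d)
    (h3 : ∀ e : Int, 2 ≤ e → e < d → ¬ e ∣ n)
    (h4 : ∀ p : Int, d ≤ p → pvPrimeB p = true → (p ∣ n ↔ p ∣ num)) :
    (if 1 < n then pvAddPair num ds n else ds)
      = ((PySem.List.pyRange d (num + 1) 1).filter (pvP num)).foldl (pvAddPair num) ds := by
  by_cases h1 : 1 < n
  · have hnprime : Nat.Prime n.toNat := pvNoSmallDiv_prime n d hd h1 hsq h3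
    have hdn : d ≤ n := by
      by_contra hlt
      exact h3 n (by omega) (by omega) dvd_rfl
    have hnnum : n ≤ num := Int.le_of_dvd (by omega) hdvd
    have hfil : (PySem.List.pyRange d (num + 1) 1).filter (pvP num) = [n] := by
      have hcong : ∀ x ∈ PySem.List.pyRange d (num + 1) 1, pvP num x = (x == n) := by
        intro x hx
        rw [PySem.List.mem_pyRange_one] at hx
        by_cases hxn : x = n
        · subst hxn
          simp only [pvP, pvPrimeB, beq_self_eq_true]
          simp [hnprime, hdvd, (by omega : (2:Int) ≤ x)]
        · have hrhs : (x == n) = false := by simp [hxn]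
          rw [hrhs]
          by_contra hne
          have hP : pvP num x = true := by
            cases hP : pvP num x with
            | true => rfl
            | false => exact absurd hP hne
          simp only [pvP, Bool.and_eq_true, decide_eq_true_eq] at hP
          have hxd : x ∣ n := (h4 x (by omega) hP.1).mpr hP.2
          exact hxn (pvPrimeDvdPrime n x h1 hnprime (pvPrimeB_two_le hP.1) hxd)
      rw [List.filter_congr hcong, List.filter_beq,
          List.count_eq_one_of_mem (PySem.List.nodup_pyRange_one _ _)
            (PySem.List.mem_pyRange_one.mpr ⟨hdn, by omega⟩)]
      rfl
    rw [if_pos h1, hfil]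
    rfl
  · have hn1 : n = 1 := by omega
    rw [if_neg h1]
    have hfil : (PySem.List.pyRange d (num + 1) 1).filter (pvP num) = [] := by
      rw [List.filter_eq_nil_iff]
      intro x hx hP
      simp only [pvP, Bool.and_eq_true, decide_eq_true_eq] at hP
      rw [PySem.List.mem_pyRange_one] at hx
      have hxd : x ∣ n := (h4 x (by omega) hP.1).mpr hP.2
      rw [hn1] at hxd
      have := Int.le_of_dvd (by omega) hxd
      have := pvPrimeB_two_le hP.1
      omega
    rw [hfil]
    rfl

-- the outer trial-division loop computes the fold over the primes ≥ d dividing num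
theorem pvTrial_spec (num : Int) (hnum : 2 ≤ num) :
    ∀ fuel : Nat, ∀ n d : Int, ∀ ds : PySem.Set Int,
    (n + 1 - d).toNat ≤ fuel → 2 ≤ d → 0 < n → n ∣ num →
    (∀ e : Int, 2 ≤ e → e < d → ¬ e ∣ n) →
    (∀ p : Int, d ≤ p → pvPrimeB p = true → (p ∣ n ↔ p ∣ num)) →
    (if 1 < (pvTrialLoop fuel num n d ds).1
       then pvAddPair num (pvTrialLoop fuel num n d ds).2 (pvTrialLoop fuel num n d ds).1
       else (pvTrialLoop fuel num n d ds).2)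
      = ((PySem.List.pyRange d (num + 1) 1).filter (pvP num)).foldl (pvAddPair num) ds := by
  intro N
  induction N with
  | zero =>
    intro n d ds h0 hd hn hdvd h3 h4
    have hsq : n < d * d := by nlinarith [(by omega : n < d)]
    rw [pvTrialLoop]
    exact pvTrial_exit num n d hnum ds hd hn hdvd hsq h3 h4
  | succ N ih =>
    intro n d ds h0 hd hn hdvd h3 h4
    rw [pvTrialLoop]
    by_cases hsq : d * d ≤ n
    · rw [if_pos hsq]
      have hdn : d ≤ n := by nlinarith
      have hnnum : n ≤ num := Int.le_of_dvd (by omega) hdvd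
      have hsplit : PySem.List.pyRange d (num + 1) 1 = d :: PySem.List.pyRange (d + 1) (num + 1) 1 :=
        PySem.List.pyRange_one_cons (by omega)
      by_cases hmod : PySem.Int.mod n d = 0
      · have hb : (PySem.Int.mod n d == 0) = true := by simp [hmod]
        rw [hb, if_pos rfl]
        have hdvdn : d ∣ n := (PySem.Int.mod_eq_zero_iff_dvd n d).mp hmod
        have hdprime : Nat.Prime d.toNat := pvPrime_of_no_small n d hd hn hdvdn h3
        obtain ⟨s1, s2, s3, s4⟩ := pvStripFac_spec d hd hdprime n.toNat n (le_refl _) hn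
        have hstriple : pvStripFac n.toNat n d ≤ n := pvStripFac_le n.toNat n d
        have hrec := ih (pvStripFac n.toNat n d) (d + 1)
          (PySem.Set.add (PySem.Set.add ds d) (PySem.Int.floordiv num d))
          (by omega) (by omega) s2 (s1.trans hdvd)
          (by
            intro e he2 hed
            rcases lt_or_eq_of_le (by omega : e ≤ d) with h | h
            · intro hcon
              exact h3 e he2 h (hcon.trans s1)
            · rw [h]; exact s3)
          (by
            intro p hp hpb
            have hp2 := pvPrimeB_two_le hpb
            rw [s4 p hp2 (pvPrimeB_prime hpb) (by omega)]
            exact h4 p (by omega) hpb)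
        rw [hrec, hsplit]
        have hPd : pvP num d = true := by
          simp only [pvP, pvPrimeB, Bool.and_eq_true, decide_eq_true_eq]
          exact ⟨⟨hd, hdprime⟩, hdvdn.trans hdvd⟩
        rw [List.filter_cons_of_pos hPd]
        rfl
      · have hb : (PySem.Int.mod n d == 0) = false := by simp [hmod]
        rw [hb]
        simp only [Bool.false_eq_true, if_false]
        have hnd : ¬ d ∣ n := fun h => hmod ((PySem.Int.mod_eq_zero_iff_dvd n d).mpr h)
        have hrec := ih n (d + 1) ds (by omega) (by omega) hn hdvd
          (by
            intro e he2 hed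
            rcases lt_or_eq_of_le (by omega : e ≤ d) with h | h
            · exact h3 e he2 h
            · rw [h]; exact hnd)
          (fun p hp hpb => h4 p (by omega) hpb)
        rw [hrec, hsplit]
        have hPd : pvP num d = false := by
          by_contra hne
          have hP : pvP num d = true := by
            cases hP : pvP num d with
            | true => rfl
            | false => exact absurd hP hne
          simp only [pvP, Bool.and_eq_true, decide_eq_true_eq] at hP
          exact hnd ((h4 d (le_refl d) hP.1).mpr hP.2)
        rw [List.filter_cons_of_neg (by simp [hPd])]
    · rw [if_neg hsq]
      exact pvTrial_exit num n d hnum ds hd hn hdvd (by omega) h3 h4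

-- ===== VERDICT (by name: the statement is the Claim_ definition above) =====
theorem find_div_of_number_spec : Claim_equal_find_div_of_number := by
  intro num _
  unfold Spec_find_div_of_number
  rcases le_or_gt 2 num with h2 | h2
  · rw [pvA_eq]
    have hmain := pvTrial_spec num h2 ((num + 1).toNat + 1) num 2 (pvDs0 num) (by omega)
      (by omega) (by omega) dvd_rfl (by intro e he hlt; omega) (fun p _ _ => Iff.rfl)
    have halt : find_div_of_number_alt num
        = (if 1 < (pvTrialLoop ((num + 1).toNat + 1) num num 2 (pvDs0 num)).1
             then pvAddPair num (pvTrialLoop ((num + 1).toNat + 1) num num 2 (pvDs0 num)).2 (pvTrialLoop ((num + 1).toNat + 1) num num 2 (pvDs0 num)).1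
             else (pvTrialLoop ((num + 1).toNat + 1) num num 2 (pvDs0 num)).2) := rfl
    rw [halt]
    exact hmain.symm
  · have hloop : pvTrialLoop ((num + 1).toNat + 1) num num 2 (pvDs0 num) = (num, pvDs0 num) := by
      rw [pvTrialLoop, if_neg (by omega : ¬ (2 : Int) * 2 ≤ num)]
    have hA : find_div_of_number num = pvDs0 num := by
      rw [pvA_eq]
      rw [PySem.List.pyRange_one 2 (num + 1)]
      have e0 : ((num + 1 - 2 : Int)).toNat = 0 := by omega
      rw [e0]
      rfl
    have hB : find_div_of_number_alt num = pvDs0 num := by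
      show (if 1 < (pvTrialLoop ((num + 1).toNat + 1) num num 2 (pvDs0 num)).1
              then PySem.Set.add (PySem.Set.add (pvTrialLoop ((num + 1).toNat + 1) num num 2 (pvDs0 num)).2
                     (pvTrialLoop ((num + 1).toNat + 1) num num 2 (pvDs0 num)).1)
                     (PySem.Int.floordiv num (pvTrialLoop ((num + 1).toNat + 1) num num 2 (pvDs0 num)).1)
              else (pvTrialLoop ((num + 1).toNat + 1) num num 2 (pvDs0 num)).2) = pvDs0 num
      rw [hloop]
      simp [show ¬ (1 : Int) < num by omega]
    rw [hA, hB]
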